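-- pv_equiv track=rewrite | github.com/LokoKanishka/Golem | scripts/golem_host_describe_analyze.py | surface_kind
-- ===== SOURCE A (Python) =====
-- def surface_kind(app: str, title: str, ocr_text: str) -> str:
--     haystack = " ".join([app, title, ocr_text]).lower()
--     if "chatgpt" in haystack or "notebooklm" in haystack:
--         return "chat-assistant"
--     if "visual studio code" in haystack or "code" in haystack:
--         return "editor"
--     if any(term in haystack for term in ["terminal", "xterm", "bash", "zsh", "fish", "kitty", "alacritty", "konsole", "tilix"]):
--         return "terminal"
--     if any(term in haystack for term in ["xmessage", "zenity", "dialog"]):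
--         return "dialog"
--     if any(term in haystack for term in ["chrome", "chromium", "firefox", "browser"]):
--         return "browser"
--     return "generic-window"
-- ===== SOURCE B (Python) =====
-- # Flat keyword index; each keyword carries the priority of its category.
-- # The winner is the matching keyword with the smallest priority (full scan + min),
-- # instead of A's ordered first-match branch chain.
-- KEYWORDS = [
--     ("chatgpt", 0, "chat-assistant"), ("notebooklm", 0, "chat-assistant"),
--     ("visual studio code", 1, "editor"), ("code", 1, "editor"),
--     ("terminal", 2, "terminal"), ("xterm", 2, "terminal"), ("bash", 2, "terminal"),
--     ("zsh", 2, "terminal"), ("fish", 2, "terminal"), ("kitty", 2, "terminal"),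
--     ("alacritty", 2, "terminal"), ("konsole", 2, "terminal"), ("tilix", 2, "terminal"),
--     ("xmessage", 3, "dialog"), ("zenity", 3, "dialog"), ("dialog", 3, "dialog"),
--     ("chrome", 4, "browser"), ("chromium", 4, "browser"),
--     ("firefox", 4, "browser"), ("browser", 4, "browser"),
-- ]
--
--
-- def surface_kind(app: str, title: str, ocr_text: str) -> str:
--     haystack = " ".join([app, title, ocr_text]).lower()
--     best = None
--     for kw, prio, cat in KEYWORDS:
--         if kw in haystack and (best is None or prio < best[0]):
--             best = (prio, cat)
--     return "generic-window" if best is None else best[1]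
-- ===== Notes on version B (the rewrite author's own statement) =====
-- stated objective: alternative
-- what changed: Replaces the ordered five-branch first-match if-chain with a min-selection over a flat keyword index: every keyword carries its category's priority, one full pass keeps the matching keyword of minimum priority, and its category (or 'generic-window') is returned.
import Mathlib
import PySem

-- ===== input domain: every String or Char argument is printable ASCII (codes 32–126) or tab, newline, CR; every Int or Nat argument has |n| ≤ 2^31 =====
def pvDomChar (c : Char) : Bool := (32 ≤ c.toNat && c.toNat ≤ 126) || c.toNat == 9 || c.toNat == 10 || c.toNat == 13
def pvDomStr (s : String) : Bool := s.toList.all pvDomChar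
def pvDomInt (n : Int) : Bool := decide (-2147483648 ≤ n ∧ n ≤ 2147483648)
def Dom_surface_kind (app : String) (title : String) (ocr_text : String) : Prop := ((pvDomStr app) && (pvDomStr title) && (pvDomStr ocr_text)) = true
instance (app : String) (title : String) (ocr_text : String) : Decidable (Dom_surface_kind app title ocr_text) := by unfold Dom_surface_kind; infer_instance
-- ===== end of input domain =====

-- B replaces A's ordered first-match if-chain by a min-priority selection over a flat
-- keyword index scanned in one full pass (objective: alternative).

-- ===== PORT A =====
def surface_kind (app : String) (title : String) (ocr_text : String) : String :=
  let haystack := PySem.Str.lower (PySem.Str.join " " [app, title, ocr_text])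
  if PySem.Str.isIn "chatgpt" haystack || PySem.Str.isIn "notebooklm" haystack then
    "chat-assistant"
  else if PySem.Str.isIn "visual studio code" haystack || PySem.Str.isIn "code" haystack then
    "editor"
  else if ["terminal", "xterm", "bash", "zsh", "fish", "kitty", "alacritty", "konsole", "tilix"].any (fun term => PySem.Str.isIn term haystack) then
    "terminal"
  else if ["xmessage", "zenity", "dialog"].any (fun term => PySem.Str.isIn term haystack) then
    "dialog"
  else if ["chrome", "chromium", "firefox", "browser"].any (fun term => PySem.Str.isIn term haystack) then
    "browser"
  else
    "generic-window"

-- ===== PORT B =====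
def pvKeywords : List (String × Nat × String) :=
  [("chatgpt", 0, "chat-assistant"), ("notebooklm", 0, "chat-assistant"),
   ("visual studio code", 1, "editor"), ("code", 1, "editor"),
   ("terminal", 2, "terminal"), ("xterm", 2, "terminal"), ("bash", 2, "terminal"),
   ("zsh", 2, "terminal"), ("fish", 2, "terminal"), ("kitty", 2, "terminal"),
   ("alacritty", 2, "terminal"), ("konsole", 2, "terminal"), ("tilix", 2, "terminal"),
   ("xmessage", 3, "dialog"), ("zenity", 3, "dialog"), ("dialog", 3, "dialog"),
   ("chrome", 4, "browser"), ("chromium", 4, "browser"),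
   ("firefox", 4, "browser"), ("browser", 4, "browser")]

def pvStep (hs : String) (best : Option (Nat × String)) (e : String × Nat × String) : Option (Nat × String) :=
  if PySem.Str.isIn e.1 hs && (match best with | none => true | some b => decide (e.2.1 < b.1)) then
    some (e.2.1, e.2.2)
  else
    best

def surface_kind_alt (app : String) (title : String) (ocr_text : String) : String :=
  let haystack := PySem.Str.lower (PySem.Str.join " " [app, title, ocr_text])
  match pvKeywords.foldl (pvStep haystack) none with
  | none => "generic-window"
  | some b => b.2

-- ===== PRECONDITION & SPEC =====
def Spec_surface_kind (app : String) (title : String) (ocr_text : String) (out : String) : Prop := out = surface_kind_alt app title ocr_text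
instance (app : String) (title : String) (ocr_text : String) (out : String) : Decidable (Spec_surface_kind app title ocr_text out) := by unfold Spec_surface_kind; infer_instance

-- ===== CLAIM (what is proved, stated in full; the proofs are below) =====
def Claim_equal_surface_kind : Prop := ∀ (app : String) (title : String) (ocr_text : String), Dom_surface_kind app title ocr_text → Spec_surface_kind app title ocr_text (surface_kind app title ocr_text)

-- ===== LEMMAS AND PROOFS =====

-- once the best is at its own priority, later same-priority keywords never replace it
theorem pvFold_stay (hs : String) (p : Nat) (c : String) (kws : List String) :
    List.foldl (pvStep hs) (some (p, c)) (kws.map (fun k => (k, p, c))) = some (p, c) := by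
  induction kws with
  | nil => rfl
  | cons k rest ih =>
    simp only [List.map_cons, List.foldl_cons, pvStep, Nat.lt_irrefl, decide_false, Bool.and_false,
      Bool.false_eq_true, if_false, ih]

-- a best of strictly smaller priority survives a whole group of priority p
theorem pvFold_skip (hs : String) (q : Nat) (d : String) (p : Nat) (c : String)
    (h : ¬ p < q) (kws : List String) :
    List.foldl (pvStep hs) (some (q, d)) (kws.map (fun k => (k, p, c))) = some (q, d) := by
  induction kws with
  | nil => rfl
  | cons k rest ih =>
    simp only [List.map_cons, List.foldl_cons, pvStep, decide_eq_false h, Bool.and_false,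
      Bool.false_eq_true, if_false, ih]

-- folding a same-priority group from none yields its entry iff some keyword of the group matches
theorem pvFold_none (hs : String) (p : Nat) (c : String) (kws : List String) :
    List.foldl (pvStep hs) none (kws.map (fun k => (k, p, c))) =
      if kws.any (fun k => PySem.Str.isIn k hs) then some (p, c) else none := by
  induction kws with
  | nil => rfl
  | cons k rest ih =>
    simp only [List.map_cons, List.foldl_cons, List.any_cons, pvStep]
    rcases Bool.eq_false_or_eq_true (PySem.Str.isIn k hs) with hk | hk
    · simpa only [hk, Bool.true_and, Bool.true_or, if_true] using pvFold_stay hs p c rest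
    · simpa only [hk, Bool.false_and, Bool.false_eq_true, if_false, Bool.false_or] using ih

-- ===== VERDICT (by name: the statement is the Claim_ definition above) =====
set_option maxHeartbeats 1000000 in
theorem surface_kind_spec : Claim_equal_surface_kind := by
  intro app title ocr_text _
  unfold Spec_surface_kind surface_kind surface_kind_alt
  generalize PySem.Str.lower (PySem.Str.join " " [app, title, ocr_text]) = hs
  have hsplit : pvKeywords =
      (["chatgpt", "notebooklm"].map (fun k => (k, 0, "chat-assistant")))
      ++ (["visual studio code", "code"].map (fun k => (k, 1, "editor")))
      ++ (["terminal", "xterm", "bash", "zsh", "fish", "kitty", "alacritty", "konsole", "tilix"].map (fun k => (k, 2, "terminal")))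
      ++ (["xmessage", "zenity", "dialog"].map (fun k => (k, 3, "dialog")))
      ++ (["chrome", "chromium", "firefox", "browser"].map (fun k => (k, 4, "browser"))) := rfl
  rw [hsplit]
  simp only [List.foldl_append]
  rw [pvFold_none]
  rcases Bool.eq_false_or_eq_true (["chatgpt", "notebooklm"].any (fun k => PySem.Str.isIn k hs)) with hb1 | hb1
  · -- a chat-assistant keyword matches: both sides give "chat-assistant"
    have h1 : (PySem.Str.isIn "chatgpt" hs || PySem.Str.isIn "notebooklm" hs) = true := by
      simpa only [List.any_cons, List.any_nil, Bool.or_false] using hb1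
    rw [if_pos hb1,
        pvFold_skip hs 0 "chat-assistant" 1 "editor" (by omega),
        pvFold_skip hs 0 "chat-assistant" 2 "terminal" (by omega),
        pvFold_skip hs 0 "chat-assistant" 3 "dialog" (by omega),
        pvFold_skip hs 0 "chat-assistant" 4 "browser" (by omega),
        if_pos h1]
  · have h1 : (PySem.Str.isIn "chatgpt" hs || PySem.Str.isIn "notebooklm" hs) = false := by
      simpa only [List.any_cons, List.any_nil, Bool.or_false] using hb1
    rw [if_neg (ne_true_of_eq_false hb1), if_neg (ne_true_of_eq_false h1), pvFold_none]
    rcases Bool.eq_false_or_eq_true (["visual studio code", "code"].any (fun k => PySem.Str.isIn k hs)) with hb2 | hb2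
    · have h2 : (PySem.Str.isIn "visual studio code" hs || PySem.Str.isIn "code" hs) = true := by
        simpa only [List.any_cons, List.any_nil, Bool.or_false] using hb2
      rw [if_pos hb2,
          pvFold_skip hs 1 "editor" 2 "terminal" (by omega),
          pvFold_skip hs 1 "editor" 3 "dialog" (by omega),
          pvFold_skip hs 1 "editor" 4 "browser" (by omega),
          if_pos h2]
    · have h2 : (PySem.Str.isIn "visual studio code" hs || PySem.Str.isIn "code" hs) = false := by
        simpa only [List.any_cons, List.any_nil, Bool.or_false] using hb2
      rw [if_neg (ne_true_of_eq_false hb2), if_neg (ne_true_of_eq_false h2), pvFold_none]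
      rcases Bool.eq_false_or_eq_true (["terminal", "xterm", "bash", "zsh", "fish", "kitty", "alacritty", "konsole", "tilix"].any (fun k => PySem.Str.isIn k hs)) with hb3 | hb3
      · rw [if_pos hb3, if_pos hb3,
            pvFold_skip hs 2 "terminal" 3 "dialog" (by omega),
            pvFold_skip hs 2 "terminal" 4 "browser" (by omega)]
      · rw [if_neg (ne_true_of_eq_false hb3), if_neg (ne_true_of_eq_false hb3), pvFold_none]
        rcases Bool.eq_false_or_eq_true (["xmessage", "zenity", "dialog"].any (fun k => PySem.Str.isIn k hs)) with hb4 | hb4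
        · rw [if_pos hb4, if_pos hb4, pvFold_skip hs 3 "dialog" 4 "browser" (by omega)]
        · rw [if_neg (ne_true_of_eq_false hb4), if_neg (ne_true_of_eq_false hb4), pvFold_none]
          rcases Bool.eq_false_or_eq_true (["chrome", "chromium", "firefox", "browser"].any (fun k => PySem.Str.isIn k hs)) with hb5 | hb5
          · rw [if_pos hb5, if_pos hb5]
          · rw [if_neg (ne_true_of_eq_false hb5), if_neg (ne_true_of_eq_false hb5)]
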